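-- pv_equiv track=rewrite | github.com/Mpa-flotta/furgoni-app | app.py | slugify_username
-- ===== SOURCE A (Python) =====
-- def slugify_username(text: str) -> str:
--     cleaned = (
--         text.lower()
--         .replace(" ", "_")
--         .replace("-", "_")
--         .replace("/", "_")
--         .replace(".", "_")
--     )
--     while "__" in cleaned:
--         cleaned = cleaned.replace("__", "_")
--     return cleaned.strip("_")
-- ===== SOURCE B (Python) =====
-- def slugify_username(text: str) -> str:
--     out = []
--     for c in text.lower():
--         ch = '_' if c in (' ', '-', '/', '.', '_') else c
--         if ch == '_' and out and out[-1] == '_':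
--             continue
--         out.append(ch)
--     return ''.join(out).strip('_')
-- ===== Notes on version B (the rewrite author's own statement) =====
-- stated objective: idiomatic
-- what changed: Replaces A's four full-string replace passes plus the repeated double-underscore collapsing loop by a single accumulator-building pass that maps each separator character to an underscore and skips it when the last emitted character is already an underscore.
import Mathlib
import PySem

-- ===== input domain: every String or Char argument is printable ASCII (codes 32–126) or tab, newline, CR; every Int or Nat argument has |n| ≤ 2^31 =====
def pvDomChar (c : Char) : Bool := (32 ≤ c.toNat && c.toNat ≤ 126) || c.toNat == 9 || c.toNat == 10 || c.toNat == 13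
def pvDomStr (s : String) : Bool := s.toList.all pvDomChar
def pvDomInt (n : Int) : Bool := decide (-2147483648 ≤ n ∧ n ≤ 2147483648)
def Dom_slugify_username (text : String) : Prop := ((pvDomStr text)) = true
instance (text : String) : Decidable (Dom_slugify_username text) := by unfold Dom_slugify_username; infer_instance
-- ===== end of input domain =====

-- B replaces A's four whole-string replace passes plus the repeated while-loop collapse of double
-- underscores by one accumulator-building pass (map separators to underscore, skip an underscore
-- emitted right after another underscore).

-- ===== PORT A =====
-- helpers needed by port A's while-loop (cited by name in its decreasing_by)

-- one left-to-right pass of Python's cleaned.replace("__", "_")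
def pvStep : List Char → List Char
  | [] => []
  | [c] => [c]
  | a :: b :: t => if a = '_' ∧ b = '_' then '_' :: pvStep t else a :: pvStep (b :: t)

lemma pvGo_dd_eq (fuel : Nat) : ∀ (l acc : List Char), l.length ≤ fuel →
    PySem.Chars.replace.go ['_', '_'] ['_'] fuel l acc = acc.reverse ++ pvStep l := by
  induction fuel with
  | zero =>
      intro l acc h
      have : l = [] := List.eq_nil_of_length_eq_zero (Nat.le_zero.mp h)
      subst this; simp [PySem.Chars.replace.go, pvStep]
  | succ n ih =>
      intro l acc h
      match l with
      | [] => simp [PySem.Chars.replace.go, pvStep]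
      | [c] =>
          by_cases hc : c = '_'
          · subst hc
            simp [PySem.Chars.replace.go, pvStep, List.isPrefixOf, ih [] _ (by simp)]
          · simp [PySem.Chars.replace.go, pvStep, List.isPrefixOf, ih [] _ (by simp)]
      | a :: b :: t =>
          have ht : t.length ≤ n := by simp at h; omega
          have htb : (b :: t).length ≤ n := by simp at h ⊢; omega
          by_cases hab : a = '_' ∧ b = '_'
          · obtain ⟨ha, hb⟩ := hab; subst ha; subst hb
            simp [PySem.Chars.replace.go, pvStep, List.isPrefixOf, ih t _ ht]
          · have hpre : List.isPrefixOf ['_', '_'] (a :: b :: t) = false := by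
              simp [List.isPrefixOf]
              intro h1 h2
              exact hab ⟨h1.symm, h2.symm⟩
            rw [show PySem.Chars.replace.go ['_', '_'] ['_'] (n+1) (a :: b :: t) acc
                  = PySem.Chars.replace.go ['_', '_'] ['_'] n (b :: t) (a :: acc) by
                  simp [PySem.Chars.replace.go, hpre]]
            rw [ih (b :: t) _ htb]
            rw [show pvStep (a :: b :: t) = a :: pvStep (b :: t) by simp [pvStep, hab]]
            simp

lemma pvReplace_dd_eq (l : List Char) :
    PySem.Chars.replace l ['_', '_'] ['_'] = pvStep l := by
  simpa using pvGo_dd_eq l.length l [] le_rfl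

lemma pvStep_length_le (l : List Char) : (pvStep l).length ≤ l.length := by
  induction l using pvStep.induct with
  | case1 => simp [pvStep]
  | case2 c => simp [pvStep]
  | case3 a b t hab ih =>
      obtain ⟨ha, hb⟩ := hab; subst ha; subst hb
      rw [show pvStep ('_' :: '_' :: t) = '_' :: pvStep t by simp [pvStep]]
      simp only [List.length_cons]
      omega
  | case4 a b t hab ih =>
      simp only [List.length_cons] at ih ⊢
      rw [show pvStep (a :: b :: t) = a :: pvStep (b :: t) by simp [pvStep, hab]]
      simp only [List.length_cons]
      omega

lemma pvStep_length_lt (l : List Char) (h : ['_', '_'] <:+: l) :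
    (pvStep l).length < l.length := by
  induction l using pvStep.induct with
  | case1 => simp at h
  | case2 c =>
      exfalso
      have := h.length_le; simp at this
  | case3 a b t hab ih =>
      obtain ⟨ha, hb⟩ := hab; subst ha; subst hb
      have := pvStep_length_le t
      rw [show pvStep ('_' :: '_' :: t) = '_' :: pvStep t by simp [pvStep]]
      simp only [List.length_cons]
      omega
  | case4 a b t hab ih =>
      have h' : ['_', '_'] <:+: (b :: t) := by
        rcases List.infix_cons_iff.mp h with hp | hi
        · exfalso
          rcases hp with ⟨u, hu⟩
          cases hu
          exact hab ⟨rfl, rfl⟩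
        · exact hi
      have := ih h'
      rw [show pvStep (a :: b :: t) = a :: pvStep (b :: t) by simp [pvStep, hab]]
      simp only [List.length_cons] at *
      omega

-- Python: while "__" in cleaned: cleaned = cleaned.replace("__", "_")
def pvWhile (cleaned : String) : String :=
  if PySem.Str.isIn "__" cleaned then pvWhile (PySem.Str.replace cleaned "__" "_") else cleaned
termination_by cleaned.toList.length
decreasing_by
  rename_i h
  rw [PySem.Str.toList_replace]
  rw [show ("__" : String).toList = ['_', '_'] from rfl,
      show ("_" : String).toList = ['_'] from rfl]
  rw [pvReplace_dd_eq]
  exact pvStep_length_lt _ (by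
    have := (PySem.Str.isIn_iff_infix "__" cleaned).mp h
    simpa using this)

def slugify_username (text : String) : String :=
  let cleaned :=
    PySem.Str.replace
      (PySem.Str.replace
        (PySem.Str.replace
          (PySem.Str.replace (PySem.Str.lower text) " " "_")
          "-" "_")
        "/" "_")
      "." "_"
  PySem.Str.stripChars (pvWhile cleaned) "_"

-- ===== PORT B =====
def slugify_username_alt (text : String) : String :=
  let lowered := (PySem.Str.lower text).toList
  let out := lowered.foldl
    (fun acc c =>
      let ch := if [' ', '-', '/', '.', '_'].contains c then '_' else c
      if ch = '_' ∧ acc.getLast? = some '_' then acc else acc ++ [ch])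
    ([] : List Char)
  PySem.Str.stripChars (String.ofList out) "_"

-- ===== PRECONDITION & SPEC =====
def Spec_slugify_username (text : String) (out : String) : Prop := out = slugify_username_alt text
instance (text : String) (out : String) : Decidable (Spec_slugify_username text out) := by unfold Spec_slugify_username; infer_instance

-- ===== CLAIM (what is proved, stated in full; the proofs are below) =====
def Claim_equal_slugify_username : Prop := ∀ (text : String), Dom_slugify_username text → Spec_slugify_username text (slugify_username text)

-- ===== LEMMAS AND PROOFS =====

-- collapse runs of '_' given the previously emitted character
def pvCol : Option Char → List Char → List Char
  | _, [] => []
  | p, c :: t => if c = '_' ∧ p = some '_' then pvCol p t else c :: pvCol (some c) t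

-- B's character map
def pvG (c : Char) : Char := if [' ', '-', '/', '.', '_'].contains c then '_' else c

lemma pvCol_step (l : List Char) : ∀ p, pvCol p (pvStep l) = pvCol p l := by
  induction l using pvStep.induct with
  | case1 => intro p; simp [pvStep]
  | case2 c => intro p; simp [pvStep]
  | case3 a b t hab ih =>
      obtain ⟨ha, hb⟩ := hab; subst ha; subst hb
      intro p
      by_cases hp : p = some '_'
      · simp [pvStep, pvCol, hp, ih]
      · simp [pvStep, pvCol, hp, ih]
  | case4 a b t hab ih =>
      intro p
      rw [show pvStep (a :: b :: t) = a :: pvStep (b :: t) by simp [pvStep, hab]]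
      by_cases hc : a = '_' ∧ p = some '_'
      · simp [pvCol, hc, ih]
      · simp [pvCol, hc, ih]

lemma pvCol_some_id : ∀ (t : List Char) (c : Char), ¬ (['_', '_'] <:+: (c :: t)) → pvCol (some c) t = t := by
  intro t
  induction t with
  | nil => intro c _; simp [pvCol]
  | cons d t' ih =>
      intro c h
      have hcd : ¬ (d = '_' ∧ (some c : Option Char) = some '_') := by
        rintro ⟨hd, hc⟩
        simp at hc
        subst hd; subst hc
        exact h ⟨[], t', rfl⟩
      have h' : ¬ (['_', '_'] <:+: (d :: t')) :=
        fun hi => h (hi.trans (List.suffix_cons c (d :: t')).isInfix)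
      simp only [pvCol, if_neg hcd]
      rw [ih d h']

lemma pvCol_none_id (l : List Char) (h : ¬ (['_', '_'] <:+: l)) : pvCol none l = l := by
  cases l with
  | nil => simp [pvCol]
  | cons c t =>
      simp only [pvCol, if_neg (by simp : ¬ (c = '_' ∧ (none : Option Char) = some '_'))]
      rw [pvCol_some_id t c h]

lemma pvWhile_toList (s : String) : (pvWhile s).toList = pvCol none s.toList := by
  induction s using pvWhile.induct with
  | case1 s h ih =>
      rw [pvWhile, if_pos h]
      rw [ih]
      rw [PySem.Str.toList_replace,
          show ("__" : String).toList = ['_', '_'] from rfl,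
          show ("_" : String).toList = ['_'] from rfl,
          pvReplace_dd_eq, pvCol_step]
  | case2 s h =>
      rw [pvWhile, if_neg h]
      have : ¬ (['_', '_'] <:+: s.toList) := by
        intro hi
        exact h ((PySem.Str.isIn_iff_infix "__" s).mpr (by simpa using hi))
      rw [pvCol_none_id _ this]

-- single-character replace is a map
lemma pvGo_one_eq (c r : Char) (fuel : Nat) : ∀ (l acc : List Char), l.length ≤ fuel →
    PySem.Chars.replace.go [c] [r] fuel l acc
      = acc.reverse ++ l.map (fun x => if x = c then r else x) := by
  induction fuel with
  | zero =>
      intro l acc h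
      have : l = [] := List.eq_nil_of_length_eq_zero (Nat.le_zero.mp h)
      subst this; simp [PySem.Chars.replace.go]
  | succ n ih =>
      intro l acc h
      match l with
      | [] => simp [PySem.Chars.replace.go]
      | a :: t =>
          have ht : t.length ≤ n := by simp at h; omega
          by_cases hac : a = c
          · subst hac
            rw [show PySem.Chars.replace.go [a] [r] (n+1) (a :: t) acc
                  = PySem.Chars.replace.go [a] [r] n t (r :: acc) by
                  simp [PySem.Chars.replace.go, List.isPrefixOf]]
            rw [ih t _ ht]; simp
          · rw [show PySem.Chars.replace.go [c] [r] (n+1) (a :: t) acc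
                  = PySem.Chars.replace.go [c] [r] n t (a :: acc) by
                  simp [PySem.Chars.replace.go, List.isPrefixOf]
                  intro h'
                  exact absurd h'.symm hac]
            rw [ih t _ ht]; simp [hac]

lemma pvReplace_one_eq (l : List Char) (c r : Char) :
    PySem.Chars.replace l [c] [r] = l.map (fun x => if x = c then r else x) := by
  simpa using pvGo_one_eq c r l.length l [] le_rfl

-- the four single-character replaces compose to B's character map
lemma pvChain_eq (x : Char) :
    (fun y => if y = '.' then '_' else y)
      ((fun y => if y = '/' then '_' else y)
        ((fun y => if y = '-' then '_' else y)
          ((fun y => if y = ' ' then '_' else y) x))) = pvG x := by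
  by_cases h1 : x = ' '
  · subst h1; decide
  by_cases h2 : x = '-'
  · subst h2; decide
  by_cases h3 : x = '/'
  · subst h3; decide
  by_cases h4 : x = '.'
  · subst h4; decide
  by_cases h5 : x = '_'
  · subst h5; decide
  simp [pvG, h1, h2, h3, h4, h5]

lemma pvCleaned_eq (l : List Char) :
    ((((l.map (fun y => if y = ' ' then '_' else y)).map
        (fun y => if y = '-' then '_' else y)).map
        (fun y => if y = '/' then '_' else y)).map
        (fun y => if y = '.' then '_' else y)) = l.map pvG := by
  simp only [List.map_map]
  exact List.map_congr_left (fun x _ => pvChain_eq x)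

-- B's fold builds pvCol of the mapped string
lemma pvFold_eq (t : List Char) : ∀ (acc : List Char),
    t.foldl
      (fun acc c =>
        if pvG c = '_' ∧ acc.getLast? = some '_' then acc else acc ++ [pvG c]) acc
      = acc ++ pvCol acc.getLast? (t.map pvG) := by
  induction t with
  | nil => intro acc; simp [pvCol]
  | cons c t ih =>
      intro acc
      simp only [List.foldl_cons, List.map_cons]
      by_cases hc : pvG c = '_' ∧ acc.getLast? = some '_'
      · rw [if_pos hc, ih acc]
        simp only [pvCol, if_pos hc]
      · rw [if_neg hc, ih (acc ++ [pvG c])]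
        rw [List.getLast?_concat]
        simp only [pvCol, if_neg hc]
        simp

-- ===== VERDICT (by name: the statement is the Claim_ definition above) =====
theorem slugify_username_spec : Claim_equal_slugify_username := by
  intro text _
  unfold Spec_slugify_username slugify_username slugify_username_alt
  simp only [PySem.Str.stripChars, PySem.Str.toList_lower, String.toList_ofList]
  rw [pvWhile_toList]
  rw [show (fun (acc : List Char) (c : Char) =>
        let ch := if [' ', '-', '/', '.', '_'].contains c then '_' else c
        if ch = '_' ∧ acc.getLast? = some '_' then acc else acc ++ [ch])
      = (fun (acc : List Char) (c : Char) =>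
        if pvG c = '_' ∧ acc.getLast? = some '_' then acc else acc ++ [pvG c]) from rfl]
  rw [pvFold_eq]
  simp only [List.nil_append, List.getLast?_nil]
  simp only [PySem.Str.toList_replace, PySem.Str.toList_lower,
    show (" " : String).toList = [' '] from rfl,
    show ("-" : String).toList = ['-'] from rfl,
    show ("/" : String).toList = ['/'] from rfl,
    show ("." : String).toList = ['.'] from rfl,
    show ("_" : String).toList = ['_'] from rfl,
    pvReplace_one_eq]
  rw [pvCleaned_eq]
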